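-- pv_equiv track=rewrite | github.com/thabnir/ApartMatch | realtor.py | realtor_round_up
-- ===== SOURCE A (Python) =====
-- def realtor_round_up(n):
--     if n < 0:
--         return 0
--     if n > 10000:
--         return 10000
--     targets = [0, 100, 200, 300, 400, 500, 600, 700, 800, 900, 1000, 1200, 1400, 1600, 1800, 2000, 2500, 3000, 3500, 4000, 4500, 5000, 6000, 7000, 8000, 9000, 10000]
--     for target in targets:
--         if n <= target:
--             return target
-- ===== SOURCE B (Python) =====
-- import bisect
--
-- _TARGETS = [0, 100, 200, 300, 400, 500, 600, 700, 800, 900, 1000, 1200, 1400, 1600, 1800, 2000, 2500, 3000, 3500, 4000, 4500, 5000, 6000, 7000, 8000, 9000, 10000]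
--
-- def realtor_round_up(n):
--     if n < 0:
--         return 0
--     if n > 10000:
--         return 10000
--     idx = bisect.bisect_left(_TARGETS, n)
--     return _TARGETS[idx]
-- ===== Notes on version B (the rewrite author's own statement) =====
-- stated objective: idiomatic
-- what changed: The linear for-loop scan over the bracket list is replaced by a binary search (bisect.bisect_left) that locates the leftmost bracket >= n, keeping the same guards and bracket table.
import Mathlib
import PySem

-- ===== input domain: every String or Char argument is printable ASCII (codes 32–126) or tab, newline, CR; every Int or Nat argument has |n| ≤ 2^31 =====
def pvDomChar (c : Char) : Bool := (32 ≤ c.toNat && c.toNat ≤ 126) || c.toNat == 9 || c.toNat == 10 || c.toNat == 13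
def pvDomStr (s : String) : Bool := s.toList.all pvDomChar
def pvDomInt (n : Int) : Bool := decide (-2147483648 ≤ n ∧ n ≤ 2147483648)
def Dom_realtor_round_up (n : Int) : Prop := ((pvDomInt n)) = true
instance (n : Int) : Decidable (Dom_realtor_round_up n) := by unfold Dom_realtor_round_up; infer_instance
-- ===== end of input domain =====

-- B replaces A's linear scan of the bracket list with a binary search (bisect_left); same guards, same table (idiomatic).


-- the shared bracket table
def pvTargets : List Int := [0, 100, 200, 300, 400, 500, 600, 700, 800, 900, 1000, 1200, 1400, 1600, 1800, 2000, 2500, 3000, 3500, 4000, 4500, 5000, 6000, 7000, 8000, 9000, 10000]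

-- ===== PORT A =====
-- the for-loop: return the first target with n ≤ target; falling off the end is Python's
-- implicit 'return None', unreachable under the guards — rendered as 0 here.
def pvScan (n : Int) : List Int → Int
  | [] => 0
  | t :: ts => if n ≤ t then t else pvScan n ts

def realtor_round_up (n : Int) : Int :=
  if n < 0 then 0
  else if n > 10000 then 10000
  else pvScan n pvTargets

-- ===== PORT B =====
-- targets[idx]: in-range under the guards (Python would raise otherwise); rendered via pyGet? with getD 0.
def realtor_round_up_alt (n : Int) : Int :=
  if n < 0 then 0
  else if n > 10000 then 10000
  else
    let idx := PySem.List.bisectLeft pvTargets n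
    (PySem.List.pyGet? pvTargets (idx : Int)).getD 0

-- ===== PRECONDITION & SPEC =====
def Spec_realtor_round_up (n : Int) (out : Int) : Prop := out = realtor_round_up_alt n
instance (n : Int) (out : Int) : Decidable (Spec_realtor_round_up n out) := by unfold Spec_realtor_round_up; infer_instance

-- ===== CLAIM (what is proved, stated in full; the proofs are below) =====
def Claim_equal_realtor_round_up : Prop := ∀ (n : Int), Dom_realtor_round_up n → Spec_realtor_round_up n (realtor_round_up n)

-- ===== LEMMAS AND PROOFS =====

-- A's scan returns xs[i] whenever every element before position i is < n and xs[i] is the first ≥ n.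
lemma pvScan_eq {n : Int} : ∀ {xs : List Int} {i : Nat} (hi : i < xs.length),
    (∀ j (hj : j < xs.length), j < i → xs[j] < n) → n ≤ xs[i] → pvScan n xs = xs[i] := by
  intro xs
  induction xs with
  | nil => intro i hi; simp at hi
  | cons x rest ih =>
    intro i hi hlt hge
    cases i with
    | zero =>
        have : n ≤ x := by simpa using hge
        simp [pvScan, this]
    | succ k =>
      have hx : x < n := hlt 0 (by simp) (Nat.succ_pos k)
      have : ¬ n ≤ x := by omega
      simp only [pvScan, this, if_false]
      exact ih (by simpa using hi)
        (fun j hj hjk => hlt (j+1) (by simpa using hj) (by omega))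
        (by simpa using hge)

theorem realtor_round_up_spec : Claim_equal_realtor_round_up := by
  intro n _
  unfold Spec_realtor_round_up realtor_round_up realtor_round_up_alt
  by_cases h0 : n < 0
  · simp [h0]
  · by_cases h1 : n > 10000
    · simp [h0, h1]
    · simp only [h0, h1, if_false]
      obtain ⟨hle, hlt, hge⟩ := PySem.List.bisectLeft_spec pvTargets n (by decide)
      set i := PySem.List.bisectLeft pvTargets n with hi
      have hlen : pvTargets.length = 27 := by decide
      have hirange : i < 27 := by
        by_contra hc
        have h26 : (26 : Nat) < i := by omega
        have := hlt 26 (by omega) h26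
        have : (10000 : Int) < n := by simpa [pvTargets] using this
        omega
      have hget : PySem.List.pyGet? pvTargets (i : Int) = some (pvTargets[i]'(by omega)) := by
        simp [pysem, hlen, hirange]
      rw [hget]
      simp only [Option.getD_some]
      exact pvScan_eq (by omega) (fun j hj hji => hlt j hj hji) (hge i (by omega) (le_refl i))
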